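-- pv_equiv track=rewrite | github.com/mozartdiniz/DiffusionAPI | diffusionapi/generate.py | get_model_name_from_label
-- ===== SOURCE A (Python) =====
-- def get_model_labels():
--     """Return a dictionary mapping model names to user-friendly labels."""
--     return {
--         # Actual models in the folder
--         "John6666__amanatsu-illustrious-v11-sdxl": "Amanatsu",
--         "models--John6666--ilustmix-v6-sdxl": "Ilustmix",
--         "models--misri--plantMilkModelSuite_hempII": "PlantMilk (HempII)",
--         "models--misri--plantMilkModelSuite_walnut": "PlantMilk (Walnut)",
--         "models--Meina--MeinaMix_V11": "MeinaMix V11",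
--         "models--digiplay--ChikMix_V3": "ChikMix V3",
--         "models--mirroring--pastel-mix": "Pastel Mix",
--     }
--
-- def get_model_name_from_label(label: str) -> str:
--     """Get the actual model name from a user-friendly label."""
--     labels = get_model_labels()
--
--     # Normalize the input label for comparison
--     normalized_input = label.lower().replace('-', ' ').replace('_', ' ').strip()
--
--     for model_name, model_label in labels.items():
--         # Normalize the stored label for comparison
--         normalized_label = model_label.lower().replace('-', ' ').replace('_', ' ').strip()
--
--         if normalized_label == normalized_input:
--             return model_name
--
--     return label  # Return the label if no match found
-- ===== SOURCE B (Python) =====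
-- # Precomputed reverse table (normalized friendly label -> model name), written out
-- # once as a constant; the per-query work is a single character-level pass instead of
-- # staged lower/replace/replace string passes and a scan over the label table.
-- _MODEL_BY_NORMALIZED_LABEL = {
--     "amanatsu": "John6666__amanatsu-illustrious-v11-sdxl",
--     "ilustmix": "models--John6666--ilustmix-v6-sdxl",
--     "plantmilk (hempii)": "models--misri--plantMilkModelSuite_hempII",
--     "plantmilk (walnut)": "models--misri--plantMilkModelSuite_walnut",
--     "meinamix v11": "models--Meina--MeinaMix_V11",
--     "chikmix v3": "models--digiplay--ChikMix_V3",
--     "pastel mix": "models--mirroring--pastel-mix",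
-- }
--
-- def get_model_name_from_label(label: str) -> str:
--     """Get the actual model name from a user-friendly label."""
--     normalized = ''.join(
--         ' ' if ch in '-_' else ch.lower() for ch in label
--     ).strip()
--     return _MODEL_BY_NORMALIZED_LABEL.get(normalized, label)
-- ===== Notes on version B (the rewrite author's own statement) =====
-- stated objective: alternative
-- what changed: B drops A's runtime scan that re-normalizes every stored label per query: it keeps a precomputed constant reverse table (normalized label -> model name) and normalizes the input in a single character-level pass (one map per char) instead of A's staged lower/replace/replace string passes, then does one table lookup with default.
import Mathlib
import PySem

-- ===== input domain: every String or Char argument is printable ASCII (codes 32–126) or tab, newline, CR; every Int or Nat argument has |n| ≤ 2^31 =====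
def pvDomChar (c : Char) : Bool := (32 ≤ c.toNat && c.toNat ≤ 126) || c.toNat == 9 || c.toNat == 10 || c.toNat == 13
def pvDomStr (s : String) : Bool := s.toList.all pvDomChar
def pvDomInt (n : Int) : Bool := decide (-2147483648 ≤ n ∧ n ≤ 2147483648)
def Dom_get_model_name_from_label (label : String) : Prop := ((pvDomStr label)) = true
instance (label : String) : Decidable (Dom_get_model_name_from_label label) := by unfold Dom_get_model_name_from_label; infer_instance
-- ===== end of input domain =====

-- B replaces A's runtime scan over the label table (which re-normalizes every stored label
-- per query with staged lower/replace/replace passes) by a precomputed constant reverse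
-- table and a single character-level normalization pass (objective: alternative).

-- ===== PORT A =====
-- module-level table get_model_labels() used by A
def get_model_labels : PySem.Dict String String :=
  PySem.Dict.ofList
    [ ("John6666__amanatsu-illustrious-v11-sdxl", "Amanatsu"),
      ("models--John6666--ilustmix-v6-sdxl", "Ilustmix"),
      ("models--misri--plantMilkModelSuite_hempII", "PlantMilk (HempII)"),
      ("models--misri--plantMilkModelSuite_walnut", "PlantMilk (Walnut)"),
      ("models--Meina--MeinaMix_V11", "MeinaMix V11"),
      ("models--digiplay--ChikMix_V3", "ChikMix V3"),
      ("models--mirroring--pastel-mix", "Pastel Mix") ]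

-- s.lower().replace('-', ' ').replace('_', ' ').strip(), exactly as written inline in A
def pvNormA (s : String) : String :=
  PySem.Str.strip (PySem.Str.replace (PySem.Str.replace (PySem.Str.lower s) "-" " ") "_" " ")

-- the 'for model_name, model_label in labels.items():' loop with its early return
def pvLoopA : List (String × String) → String → String → String
  | [], _, label => label
  | (model_name, model_label) :: rest, normalized_input, label =>
      if pvNormA model_label == normalized_input then model_name
      else pvLoopA rest normalized_input label

def get_model_name_from_label (label : String) : String :=
  let labels := get_model_labels
  let normalized_input := pvNormA label
  pvLoopA labels.items normalized_input label

-- ===== PORT B =====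
-- Source B's module-level constant _MODEL_BY_NORMALIZED_LABEL
def pvModelByNormalizedLabel : PySem.Dict String String :=
  PySem.Dict.ofList
    [ ("amanatsu", "John6666__amanatsu-illustrious-v11-sdxl"),
      ("ilustmix", "models--John6666--ilustmix-v6-sdxl"),
      ("plantmilk (hempii)", "models--misri--plantMilkModelSuite_hempII"),
      ("plantmilk (walnut)", "models--misri--plantMilkModelSuite_walnut"),
      ("meinamix v11", "models--Meina--MeinaMix_V11"),
      ("chikmix v3", "models--digiplay--ChikMix_V3"),
      ("pastel mix", "models--mirroring--pastel-mix") ]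

-- per-character body of Source B's generator expression: ' ' if ch in '-_' else ch.lower()
def pvCharNorm (c : Char) : Char :=
  if c == '-' || c == '_' then ' ' else PySem.Chars.lowerChar c

def get_model_name_from_label_alt (label : String) : String :=
  let normalized := PySem.Str.strip (String.ofList (label.toList.map pvCharNorm))
  pvModelByNormalizedLabel.getD normalized label

-- ===== PRECONDITION & SPEC =====
def Spec_get_model_name_from_label (label : String) (out : String) : Prop := out = get_model_name_from_label_alt label
instance (label : String) (out : String) : Decidable (Spec_get_model_name_from_label label out) := by unfold Spec_get_model_name_from_label; infer_instance

-- ===== CLAIM (what is proved, stated in full; the proofs are below) =====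
def Claim_equal_get_model_name_from_label : Prop := ∀ (label : String), Dom_get_model_name_from_label label → Spec_get_model_name_from_label label (get_model_name_from_label label)

-- ===== LEMMAS AND PROOFS =====

-- replacing a single-character pattern by a single character is a character map
theorem pv_replace_go_single (o n : Char) :
    ∀ (l : List Char) (fuel : Nat) (acc : List Char), l.length ≤ fuel →
      PySem.Chars.replace.go [o] [n] fuel l acc
        = acc.reverse ++ l.map (fun c => if c == o then n else c) := by
  intro l
  induction l with
  | nil =>
      intro fuel acc _
      cases fuel <;> simp [PySem.Chars.replace.go]
  | cons c t ih =>
      intro fuel acc hle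
      cases fuel with
      | zero => simp at hle
      | succ f =>
          have hf : t.length ≤ f := by simp at hle; omega
          by_cases h : c = o
          · subst h
            simp only [PySem.Chars.replace.go]
            rw [if_pos (by simp [List.isPrefixOf])]
            simp only [List.length_cons, List.length_nil, List.drop_succ_cons,
              List.drop_zero, List.reverse_cons, List.reverse_nil, List.nil_append,
              List.singleton_append]
            rw [ih f (n :: acc) hf]
            simp
          · simp only [PySem.Chars.replace.go]
            rw [if_neg (by simp [List.isPrefixOf, Ne.symm h])]
            rw [ih f (c :: acc) hf]
            simp [h]

theorem pv_replace_single (o n : Char) (l : List Char) :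
    PySem.Chars.replace l [o] [n] = l.map (fun c => if c == o then n else c) := by
  simpa using pv_replace_go_single o n l l.length [] le_rfl

-- the composed per-character effect of A's lower + two replaces is B's pvCharNorm
theorem pv_charNorm_eq (c : Char) :
    (if (if PySem.Chars.lowerChar c == '-' then ' ' else PySem.Chars.lowerChar c) == '_'
      then ' ' else if PySem.Chars.lowerChar c == '-' then ' ' else PySem.Chars.lowerChar c)
      = pvCharNorm c := by
  unfold pvCharNorm PySem.Chars.lowerChar PySem.Chars.isupper
  by_cases hu : ('A' ≤ c ∧ c ≤ 'Z')
  · have hA : (65 : Nat) ≤ c.toNat := Fin.mk_le_mk.mp hu.1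
    have hZ : c.toNat ≤ (90 : Nat) := Fin.mk_le_mk.mp hu.2
    have key : Char.ofNat (c.toNat + 32) ≠ '-' ∧ Char.ofNat (c.toNat + 32) ≠ '_' := by
      generalize hg : c.toNat = m at hA hZ
      interval_cases m <;> exact ⟨by decide, by decide⟩
    have hc1 : c ≠ '-' := by
      intro h; rw [h] at hA; exact absurd hA (by decide)
    have hc2 : c ≠ '_' := by
      intro h; rw [h] at hZ; exact absurd hZ (by decide)
    simp [hu.1, hu.2, key.1, key.2, hc1, hc2]
  · by_cases h1 : c = '-'
    · subst h1; simp
    · by_cases h2 : c = '_'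
      · subst h2; simp
      · simp [hu, h1, h2]

-- A's staged normalization equals B's single-pass normalization, on every string
theorem pv_norm_eq (s : String) :
    pvNormA s = PySem.Str.strip (String.ofList (s.toList.map pvCharNorm)) := by
  have h1 : ("-" : String).toList = ['-'] := rfl
  have h2 : ("_" : String).toList = ['_'] := rfl
  have h3 : (" " : String).toList = [' '] := rfl
  have hinner : (PySem.Str.replace (PySem.Str.replace (PySem.Str.lower s) "-" " ") "_" " ").toList
      = s.toList.map pvCharNorm := by
    rw [PySem.Str.toList_replace, PySem.Str.toList_replace, PySem.Str.toList_lower,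
      h1, h2, h3, pv_replace_single, pv_replace_single]
    unfold PySem.Chars.lower
    simp only [List.map_map]
    apply List.map_congr_left
    intro c _
    exact pv_charNorm_eq c
  have hL : (pvNormA s).toList
      = (PySem.Str.strip (String.ofList (s.toList.map pvCharNorm))).toList := by
    unfold pvNormA
    rw [PySem.Str.toList_strip, PySem.Str.toList_strip, hinner, String.toList_ofList]
  exact String.toList_inj.mp hL

theorem pv_items_eq :
    get_model_labels.items
    = [ ("John6666__amanatsu-illustrious-v11-sdxl", "Amanatsu"),
        ("models--John6666--ilustmix-v6-sdxl", "Ilustmix"),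
        ("models--misri--plantMilkModelSuite_hempII", "PlantMilk (HempII)"),
        ("models--misri--plantMilkModelSuite_walnut", "PlantMilk (Walnut)"),
        ("models--Meina--MeinaMix_V11", "MeinaMix V11"),
        ("models--digiplay--ChikMix_V3", "ChikMix V3"),
        ("models--mirroring--pastel-mix", "Pastel Mix") ] := by decide

theorem pv_dict_eq :
    pvModelByNormalizedLabel
    = PySem.Dict.mk
      [ ("amanatsu", "John6666__amanatsu-illustrious-v11-sdxl"),
        ("ilustmix", "models--John6666--ilustmix-v6-sdxl"),
        ("plantmilk (hempii)", "models--misri--plantMilkModelSuite_hempII"),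
        ("plantmilk (walnut)", "models--misri--plantMilkModelSuite_walnut"),
        ("meinamix v11", "models--Meina--MeinaMix_V11"),
        ("chikmix v3", "models--digiplay--ChikMix_V3"),
        ("pastel mix", "models--mirroring--pastel-mix") ] := by decide

theorem pv_normA_lits :
    pvNormA "Amanatsu" = "amanatsu" ∧ pvNormA "Ilustmix" = "ilustmix" ∧
    pvNormA "PlantMilk (HempII)" = "plantmilk (hempii)" ∧
    pvNormA "PlantMilk (Walnut)" = "plantmilk (walnut)" ∧
    pvNormA "MeinaMix V11" = "meinamix v11" ∧ pvNormA "ChikMix V3" = "chikmix v3" ∧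
    pvNormA "Pastel Mix" = "pastel mix" := by decide

-- ===== VERDICT (by name: the statement is the Claim_ definition above) =====
theorem get_model_name_from_label_spec : Claim_equal_get_model_name_from_label := by
  intro label _
  unfold Spec_get_model_name_from_label get_model_name_from_label get_model_name_from_label_alt
  obtain ⟨h1, h2, h3, h4, h5, h6, h7⟩ := pv_normA_lits
  show pvLoopA get_model_labels.items (pvNormA label) label = _
  rw [pv_items_eq, ← pv_norm_eq, pv_dict_eq]
  simp only [pvLoopA, h1, h2, h3, h4, h5, h6, h7,
    PySem.Dict.getD_eq_get?_getD, PySem.Dict.get?_mk_cons]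
  split_ifs <;> rfl
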